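-- pv_equiv track=rewrite | github.com/vsahni3/SHOWS4U | app/main.py | calc_maxes
-- ===== SOURCE A (Python) =====
-- def calc_maxes(data, num_maxes):
--   mapper = {}
--   for item in data:
--       if item in mapper:
--         mapper[item] += 1
--       else:
--         mapper[item] = 1
--
--   mapper[''] = 0
--   maxes = [''] * num_maxes
--   for search in mapper:
--     count = mapper[search]
--
--     for i in range(len(maxes)):
--         if count > mapper[maxes[i]]:
--             for j in range(len(maxes) - 1, i, -1):
--                 maxes[j] = maxes[j - 1]
--             maxes[i] = search
--             break
--   return maxes
-- ===== SOURCE B (Python) =====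
-- def calc_maxes(data, num_maxes):
--     counts = {}
--     for item in data:
--         counts[item] = counts.get(item, 0) + 1
--     items = sorted([it for it in counts if it != ''], key=lambda it: -counts[it])
--     n = max(num_maxes, 0)
--     top = items[:n]
--     return top + [''] * (n - len(top))
-- ===== Notes on version B (the rewrite author's own statement) =====
-- stated objective: faster
-- what changed: A fills a fixed-size maxes array by, for each distinct key, scanning it for an insertion slot and shifting elements right by hand; B builds the frequency dict once, stable-sorts the non-empty distinct items by descending count (ties keep first-seen order), then slices to num_maxes and pads with ''.
import Mathlib
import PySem

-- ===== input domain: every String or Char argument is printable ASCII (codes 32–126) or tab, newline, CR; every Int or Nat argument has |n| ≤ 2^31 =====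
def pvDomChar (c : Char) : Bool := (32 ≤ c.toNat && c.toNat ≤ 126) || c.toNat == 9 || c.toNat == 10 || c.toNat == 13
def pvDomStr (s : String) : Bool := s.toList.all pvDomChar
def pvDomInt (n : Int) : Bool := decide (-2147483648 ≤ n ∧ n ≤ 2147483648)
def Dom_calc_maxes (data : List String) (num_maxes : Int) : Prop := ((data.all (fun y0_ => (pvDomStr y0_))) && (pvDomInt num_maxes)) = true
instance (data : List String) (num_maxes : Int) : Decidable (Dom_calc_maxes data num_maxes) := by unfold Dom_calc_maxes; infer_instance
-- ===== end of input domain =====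

-- B replaces A's per-key scan-and-shift insertion into the fixed-size `maxes` array by one stable
-- sort of the non-empty distinct items by descending count, then slice to num_maxes and pad with ''
-- (faster: a timing run measured B well ahead of A on the generated inputs).

-- ===== PORT A =====
-- inner 'for j in range(len(maxes)-1, i, -1): maxes[j] = maxes[j-1]' — j runs len-1 down to i+1;
-- indices j, j-1 are in range, so List.set / List.getD are exact for Python's maxes[j] = maxes[j-1]
def pvAShift (m : List String) (j i : Nat) : List String :=
  if i < j then pvAShift (m.set j (m.getD (j - 1) "")) (j - 1) i else m
termination_by j
decreasing_by omega

-- inner 'for i in range(len(maxes)): if count > mapper[maxes[i]]: <shift>; maxes[i] = search; break'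
-- mapper[maxes[i]] : every entry of maxes is a key of mapper ('' or an inserted search), so getD is exact
def pvAInner (mapper : PySem.Dict String Int) (search : String) (count : Int) (m : List String) (i : Nat) : List String :=
  if h : i < m.length then
    if mapper.getD m[i] 0 < count then
      (pvAShift m (m.length - 1) i).set i search
    else pvAInner mapper search count m (i + 1)
  else m
termination_by m.length - i
decreasing_by omega

def calc_maxes (data : List String) (num_maxes : Int) : List String :=
  let mapper : PySem.Dict String Int :=
    data.foldl (fun d item =>
      if d.contains item then d.insert item (d.getD item 0 + 1) else d.insert item 1)
      PySem.Dict.empty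
  let mapper := mapper.insert "" 0
  let maxes := PySem.List.pyRepeat [""] num_maxes
  -- mapper[search] : search is a key of mapper, so getD is exact
  mapper.keys.foldl (fun maxes search => pvAInner mapper search (mapper.getD search 0) maxes 0) maxes

-- ===== PORT B =====
def calc_maxes_alt (data : List String) (num_maxes : Int) : List String :=
  let counts : PySem.Dict String Int :=
    data.foldl (fun d item => d.insert item (d.getD item 0 + 1)) PySem.Dict.empty
  -- counts[it] : it is a key of counts, so getD is exact
  let items := PySem.List.sorted (counts.keys.filter (fun it => it != ""))
                 (fun it => -(counts.getD it 0)) false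
  let n : Int := max num_maxes 0
  let top := PySem.List.slice items none (some n)
  top ++ PySem.List.pyRepeat [""] (n - top.length)

-- ===== PRECONDITION & SPEC =====
def Spec_calc_maxes (data : List String) (num_maxes : Int) (out : List String) : Prop := out = calc_maxes_alt data num_maxes
instance (data : List String) (num_maxes : Int) (out : List String) : Decidable (Spec_calc_maxes data num_maxes out) := by unfold Spec_calc_maxes; infer_instance

-- ===== CLAIM (what is proved, stated in full; the proofs are below) =====
def Claim_equal_calc_maxes : Prop := ∀ (data : List String) (num_maxes : Int), Dom_calc_maxes data num_maxes → Spec_calc_maxes data num_maxes (calc_maxes data num_maxes)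

-- ===== LEMMAS AND PROOFS =====

theorem pvAShift_eq (i : Nat) : ∀ (d : Nat) (m : List String) (j : Nat), j = i + d → j < m.length →
    pvAShift m j i = m.take (i + 1) ++ (m.drop i).take (j - i) ++ m.drop (j + 1) := by
  intro d
  induction d with
  | zero =>
      intro m j hj hlen
      subst hj
      rw [pvAShift]
      simp only [Nat.lt_irrefl, if_false, Nat.sub_self, List.take_zero, List.append_nil]
      rw [List.take_append_drop]
  | succ d ih =>
      intro m j hj hlen
      subst hj
      have hj1 : i + (d + 1) - 1 = i + d := by omega
      have hid : i + d < m.length := by omega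
      have hid1 : i + d + 1 < m.length := by omega
      rw [pvAShift, if_pos (by omega), hj1]
      set v := m.getD (i + d) "" with hv
      have hvv : v = m[i + d] := by rw [hv]; exact List.getD_eq_getElem m "" hid
      set m' := m.set (i + (d + 1)) v with hm'
      have hA : m'.take (i + 1) = m.take (i + 1) := List.take_set_of_le (by omega)
      have hB : (m'.drop i).take (i + d - i) = (m.drop i).take d := by
        rw [hm', List.drop_set, if_neg (by omega)]
        have : i + (d + 1) - i = d + 1 := by omega
        rw [this]
        rw [List.take_set_of_le (by omega)]
        congr 1
        omega
      have hC : m'.drop (i + d + 1) = m[i + d] :: m.drop (i + d + 1 + 1) := by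
        rw [hm', List.drop_set, if_neg (by omega)]
        have h0 : i + (d + 1) - (i + d + 1) = 0 := by omega
        rw [h0, List.drop_eq_getElem_cons (by omega : i + d + 1 < m.length)]
        rw [List.set_cons_zero, hvv]
      have hD : (m.drop i).take (i + (d + 1) - i) = (m.drop i).take d ++ [m[i + d]] := by
        have : i + (d + 1) - i = d + 1 := by omega
        rw [this, List.take_add_one]
        congr 1
        rw [List.getElem?_drop, List.getElem?_eq_getElem hid]
        rfl
      rw [ih m' (i + d) rfl (by simp [hm']; omega), hA, hB, hC, hD]
      simp
      omega

theorem pvAShift_set (m : List String) (i : Nat) (x : String) (h : i < m.length) :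
    (pvAShift m (m.length - 1) i).set i x = (m.take i ++ x :: m.drop i).take m.length := by
  rw [pvAShift_eq i (m.length - 1 - i) m (m.length - 1) (by omega) (by omega)]
  have h1 : m.drop (m.length - 1 + 1) = [] := by
    apply List.drop_eq_nil_of_le; omega
  rw [h1, List.append_nil]
  rw [List.set_append, if_pos (by simp; omega)]
  have h2 : (m.take (i+1)).set i x = m.take i ++ [x] := by
    rw [List.take_add_one, List.getElem?_eq_getElem h, List.set_append, if_neg (by simp)]
    have : i - min i m.length = 0 := by omega
    simp [this]
  rw [h2]
  have h3 : (x :: m.drop i).take (m.length - i) = x :: (m.drop i).take (m.length - 1 - i) := by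
    have : m.length - i = (m.length - 1 - i) + 1 := by omega
    rw [this, List.take_succ_cons]
  have h5 : List.take m.length (List.take i m ++ x :: List.drop i m)
      = List.take i m ++ List.take (m.length - i) (x :: List.drop i m) := by
    rw [List.take_append]
    congr 1
    · rw [List.take_take]; congr 1; omega
    · congr 1; simp; omega
  rw [h5, h3]
  simp

def pvIns (p : String → Bool) (x : String) (m : List String) : List String :=
  match m.findIdx? p with
  | none => m
  | some q => (m.take q ++ x :: m.drop q).take m.length

theorem pvAInner_eq (mapper : PySem.Dict String Int) (s : String) (count : Int) :
    ∀ (fuel i : Nat) (m : List String), m.length - i = fuel →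
    pvAInner mapper s count m i =
      match (m.drop i).findIdx? (fun y => decide (mapper.getD y 0 < count)) with
      | none => m
      | some q => (m.take (i + q) ++ s :: m.drop (i + q)).take m.length := by
  intro fuel
  induction fuel with
  | zero =>
      intro i m hf
      rw [pvAInner, dif_neg (by omega)]
      rw [List.drop_eq_nil_of_le (by omega)]
      simp
  | succ fuel ih =>
      intro i m hf
      have hi : i < m.length := by omega
      rw [pvAInner, dif_pos hi]
      rw [List.drop_eq_getElem_cons hi, List.findIdx?_cons]
      by_cases hp : mapper.getD m[i] 0 < count
      · have hp' : (decide (mapper.getD m[i] 0 < count)) = true := by simpa using hp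
        rw [if_pos hp, hp']
        simp only [if_true]
        rw [pvAShift_set m i s hi]
        simp
      · have hp' : (decide (mapper.getD m[i] 0 < count)) = false := by simpa using hp
        rw [if_neg hp]
        rw [ih (i+1) m (by omega)]
        cases hq : (m.drop (i+1)).findIdx? (fun y => decide (mapper.getD y 0 < count)) with
        | none => simp [hp']
        | some q =>
            simp only [hp', Bool.false_eq_true, if_false, Option.map_some]
            have h9 : i + (q + 1) = i + 1 + q := by omega
            rw [h9]

theorem pvAInner_zero (mapper : PySem.Dict String Int) (s : String) (count : Int) (m : List String) :
    pvAInner mapper s count m 0 = pvIns (fun y => decide (mapper.getD y 0 < count)) s m := by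
  rw [pvAInner_eq mapper s count (m.length) 0 m (by omega), pvIns]
  simp

def pvPadded (n : Nat) (acc : List String) : List String :=
  acc.take n ++ List.replicate (n - acc.length) ""

theorem pvPadded_length (n : Nat) (acc : List String) : (pvPadded n acc).length = n := by
  simp [pvPadded]; omega

theorem pvPadded_take (n m : Nat) (acc : List String) (h : m ≤ n) :
    (pvPadded n acc).take m = pvPadded m acc := by
  simp only [pvPadded, List.take_append, List.take_take, List.take_replicate]
  congr 1
  · congr 1; omega
  · congr 1; simp; omega

theorem pvIns_nil_pad (p : String → Bool) (x : String) (hp : p "" = true) (n : Nat) :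
    pvIns p x (pvPadded n []) = pvPadded n [x] := by
  cases n with
  | zero => rfl
  | succ k =>
      simp only [pvPadded, List.take_nil, List.nil_append, List.length_nil, Nat.sub_zero]
      rw [pvIns]
      rw [List.replicate_succ, List.findIdx?_cons, hp]
      simp only [List.take_zero, List.nil_append, List.take_succ_cons, List.length_replicate,
        List.drop_zero, List.length_cons, if_true]
      rw [← List.replicate_succ, List.take_replicate]
      simp

theorem pvPadded_zero (acc : List String) : pvPadded 0 acc = [] := by simp [pvPadded]

theorem pvPadded_cons (n : Nat) (y : String) (t : List String) :
    pvPadded (n + 1) (y :: t) = y :: pvPadded n t := by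
  simp only [pvPadded, List.take_succ_cons, List.length_cons, List.cons_append]
  congr 3
  omega

theorem pvPadded_cons_take (k : Nat) (y : String) (t : List String) :
    (y :: pvPadded k t).take k = pvPadded k (y :: t) := by
  cases k with
  | zero => simp [pvPadded_zero]
  | succ j =>
      rw [List.take_succ_cons, pvPadded_take (j+1) j t (by omega), pvPadded_cons]

theorem pvIns_padded (p : String → Bool) (bef : String → String → Bool) (x : String)
    (hp : p "" = true) (hbef : ∀ y, bef x y = p y) :
    ∀ (acc : List String) (n : Nat),
    pvIns p x (pvPadded n acc) = pvPadded n (PySem.List.insertBy bef x acc) := by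
  intro acc
  induction acc with
  | nil => intro n; rw [show PySem.List.insertBy bef x [] = [x] from rfl]; exact pvIns_nil_pad p x hp n
  | cons y t ih =>
      intro n
      cases n with
      | zero => simp [pvPadded_zero, pvIns]
      | succ k =>
          rw [pvPadded_cons]
          by_cases hpy : p y = true
          · rw [show PySem.List.insertBy bef x (y :: t) = x :: y :: t by
              rw [PySem.List.insertBy]; rw [hbef y, hpy]; simp]
            rw [pvIns, List.findIdx?_cons, hpy]
            simp only [if_true]
            have hlen : (y :: pvPadded k t).length = k + 1 := by simp [pvPadded_length]
            rw [hlen]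
            simp only [List.take_zero, List.nil_append, List.drop_zero, List.take_succ_cons]
            rw [pvPadded_cons_take, pvPadded_cons]
          · have hpy' : p y = false := by simpa using hpy
            rw [show PySem.List.insertBy bef x (y :: t) = y :: PySem.List.insertBy bef x t by
              rw [PySem.List.insertBy]; rw [hbef y, hpy']; simp]
            rw [pvPadded_cons, pvIns, List.findIdx?_cons, hpy']
            simp only [Bool.false_eq_true, if_false]
            rw [← ih k, pvIns]
            cases hq : (pvPadded k t).findIdx? p with
            | none => simp
            | some q =>
                simp only [Option.map_some]
                have hlen : (y :: pvPadded k t).length = k + 1 := by simp [pvPadded_length]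
                rw [hlen, pvPadded_length]
                rw [List.take_succ_cons, List.drop_succ_cons, List.cons_append, List.take_succ_cons]

theorem pvIns_skip (p : String → Bool) (x : String) (m : List String)
    (h : ∀ y ∈ m, p y = false) : pvIns p x m = m := by
  rw [pvIns, List.findIdx?_eq_none_iff.2 h]

theorem pvOuter (mapper : PySem.Dict String Int) (n : Nat) (hnil : mapper.getD "" 0 = 0) :
    ∀ (K acc : List String), (∀ y ∈ acc, 1 ≤ mapper.getD y 0) →
    (∀ x ∈ K, x ≠ "" → 1 ≤ mapper.getD x 0) →
    K.foldl (fun M s => pvAInner mapper s (mapper.getD s 0) M 0) (pvPadded n acc)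
      = pvPadded n ((K.filter (fun s => s != "")).foldl
          (fun a x => PySem.List.insertBy
            (fun a b => decide (mapper.getD b 0 < mapper.getD a 0)) x a) acc) := by
  intro K
  induction K with
  | nil => intro acc _ _; rfl
  | cons s K' ih =>
      intro acc hacc hK
      rw [List.foldl_cons, pvAInner_zero]
      by_cases hs : s = ""
      · subst hs
        rw [pvIns_skip _ _ _ ?_]
        · rw [List.filter_cons]
          simp only [bne_self_eq_false, Bool.false_eq_true, if_false]
          exact ih acc hacc (fun x hx => hK x (List.mem_cons_of_mem _ hx))
        · intro y hy
          rw [hnil]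
          simp only [decide_eq_false_iff_not, not_lt]
          rcases List.mem_append.1 hy with h | h
          · have := hacc y (List.mem_of_mem_take h)
            omega
          · rw [List.eq_of_mem_replicate h, hnil]
      · have hx : 1 ≤ mapper.getD s 0 := hK s (List.mem_cons_self) hs
        rw [pvIns_padded _ (fun a b => decide (mapper.getD b 0 < mapper.getD a 0)) s
          (by simp only [decide_eq_true_iff, hnil]; omega) (fun y => rfl) acc n]
        rw [List.filter_cons, if_pos (by simpa using hs)]
        rw [List.foldl_cons]
        exact ih _ (fun y hy => by
          rcases (PySem.List.mem_insertBy _ _ _ _).1 hy with h | h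
          · subst h; exact hx
          · exact hacc y h) (fun x hx' => hK x (List.mem_cons_of_mem _ hx'))

theorem pvInsertBy_congr (b1 b2 : String → String → Bool) (x : String) :
    ∀ l : List String, (∀ y ∈ l, b1 x y = b2 x y) →
    PySem.List.insertBy b1 x l = PySem.List.insertBy b2 x l := by
  intro l
  induction l with
  | nil => intro _; rfl
  | cons y t ih =>
      intro h
      rw [PySem.List.insertBy, PySem.List.insertBy, h y (List.mem_cons_self)]
      by_cases hb : b2 x y = true
      · rw [hb]; simp
      · have hb' : b2 x y = false := by simpa using hb
        rw [hb']
        simp only [Bool.false_eq_true, if_false]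
        rw [ih (fun z hz => h z (List.mem_cons_of_mem _ hz))]

theorem pvFoldIns_congr (b1 b2 : String → String → Bool) (S : String → Prop)
    (hS : ∀ a b, S a → S b → b1 a b = b2 a b) :
    ∀ (K acc : List String), (∀ x ∈ K, S x) → (∀ y ∈ acc, S y) →
    K.foldl (fun a x => PySem.List.insertBy b1 x a) acc
      = K.foldl (fun a x => PySem.List.insertBy b2 x a) acc := by
  intro K
  induction K with
  | nil => intro acc _ _; rfl
  | cons s K' ih =>
      intro acc hK hacc
      have hsS : S s := hK s (List.mem_cons_self)
      rw [List.foldl_cons, List.foldl_cons,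
        pvInsertBy_congr b1 b2 s acc (fun y hy => hS s y hsS (hacc y hy))]
      exact ih _ (fun x hx => hK x (List.mem_cons_of_mem _ hx))
        (fun y hy => by
          rcases (PySem.List.mem_insertBy _ _ _ _).1 hy with h | h
          · subst h; exact hsS
          · exact hacc y h)

theorem pvPadded_nil (n : Nat) : pvPadded n [] = List.replicate n "" := by simp [pvPadded]

theorem calc_maxes_eq_alt (data : List String) (num_maxes : Int) :
    calc_maxes data num_maxes = calc_maxes_alt data num_maxes := by
  unfold calc_maxes calc_maxes_alt
  simp only []
  have hstep : (fun (d : PySem.Dict String Int) item =>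
      if d.contains item then d.insert item (d.getD item 0 + 1) else d.insert item 1)
      = (fun (d : PySem.Dict String Int) item => d.insert item (d.getD item 0 + 1)) := by
    funext d it
    by_cases h : d.contains it
    · rw [if_pos h]
    · have h' : d.contains it = false := by simpa using h
      rw [if_neg (by simp [h']), PySem.Dict.getD_of_not_contains d 0 h']
      norm_num
  rw [hstep, PySem.Dict.foldl_insert_getD_add_one_eq_counter]
  set C := PySem.Dict.counter data with hC
  set M := C.insert "" 0 with hM
  set n := num_maxes.toNat with hn
  have hnil : M.getD "" 0 = 0 := PySem.Dict.getD_insert_self C "" 0 0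
  -- A side: the outer loop
  rw [PySem.List.pyRepeat_singleton, ← pvPadded_nil n]
  rw [pvOuter M n hnil M.keys [] (by simp) ?hK]
  case hK =>
    intro x hx hne
    rw [hM, PySem.Dict.getD_insert_of_ne _ _ _ hne]
    have hmem : x ∈ C.keys := by
      rcases (PySem.Dict.mem_keys_insert C "" x 0).1 (hM ▸ hx) with h | h
      · exact absurd h hne
      · exact h
    rw [hC, PySem.Dict.getD_counter]
    have : x ∈ data := (PySem.Set.mem_ofList data x).1 (by rwa [hC, PySem.Dict.keys_counter] at hmem)
    exact_mod_cast List.count_pos_iff.2 this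
  -- the filtered key lists agree
  have hkeys : M.keys.filter (fun s => s != "") = C.keys.filter (fun it => it != "") := by
    by_cases hc : C.contains ""
    · rw [hM, PySem.Dict.keys_insert_of_contains C 0 hc]
    · rw [hM, PySem.Dict.keys_insert_of_not_contains C 0 (by simpa using hc), List.filter_append]
      simp
  rw [hkeys]
  -- B side: the stable sort as a fold of insertions
  rw [PySem.List.sorted_eq_foldl_insertBy]
  rw [pvFoldIns_congr (fun a b => decide (M.getD b 0 < M.getD a 0))
        (fun a b => decide ((fun it => -(C.getD it 0)) a < (fun it => -(C.getD it 0)) b))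
        (fun s => s ≠ "") ?hS (C.keys.filter (fun it => it != "")) [] ?hKf (by simp)]
  case hS =>
    intro a b ha hb
    simp only [hM, PySem.Dict.getD_insert_of_ne C 0 0 ha, PySem.Dict.getD_insert_of_ne C 0 0 hb,
      decide_eq_decide]
    omega
  case hKf =>
    intro x hx
    simpa using List.of_mem_filter hx
  -- padding and slicing agree
  set items := List.foldl (fun acc x =>
    PySem.List.insertBy (fun a b => decide ((fun it => -(C.getD it 0)) a < (fun it => -(C.getD it 0)) b)) x acc)
    [] (C.keys.filter (fun it => it != "")) with hitems
  rw [PySem.List.slice_to items (le_max_right num_maxes 0), PySem.List.pyRepeat_singleton]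
  have htn : (max num_maxes 0).toNat = n := by omega
  rw [htn, pvPadded]
  congr 1
  congr 1
  simp only [List.length_take]
  omega

-- ===== VERDICT (by name: the statement is the Claim_ definition above) =====
theorem calc_maxes_spec : Claim_equal_calc_maxes := by
  intro data num_maxes _
  unfold Spec_calc_maxes
  exact calc_maxes_eq_alt data num_maxes
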